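-- pv_equiv track=rewrite | github.com/gabepen/ems_effect | src/permutation_sim.py | precompute_mutation_sites
-- ===== SOURCE A (Python) =====
-- from typing import Dict, List, Any
--
-- def precompute_mutation_sites(gene_seqs: Dict[str, str]) -> Dict[str, Dict[str, List[int]]]:
--     '''Precompute C/G sites for each gene to avoid repeated scanning.
--
--     Args:
--         gene_seqs: Dictionary mapping gene IDs to sequences
--
--     Returns:
--         Dictionary mapping gene IDs to their C and G site positions
--     '''
--     site_cache = {}
--     for gene, seq in gene_seqs.items():
--         site_cache[gene] = {
--             'C': [i for i, base in enumerate(seq) if base == 'C'],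
--             'G': [i for i, base in enumerate(seq) if base == 'G']
--         }
--     return site_cache
-- ===== SOURCE B (Python) =====
-- def precompute_mutation_sites(gene_seqs):
--     '''Locate C/G sites by repeated str.find jumps instead of enumerating every base.'''
--     site_cache = {}
--     for gene, seq in gene_seqs.items():
--         sites = {}
--         for base in 'CG':
--             positions = []
--             i = seq.find(base)
--             while i != -1:
--                 positions.append(i)
--                 i = seq.find(base, i + 1)
--             sites[base] = positions
--         site_cache[gene] = sites
--     return site_cache
-- ===== Notes on version B (the rewrite author's own statement) =====
-- stated objective: alternative
-- what changed: Instead of A's two filtering enumerations over every base of each sequence, B repeatedly jumps to the next occurrence with str.find(base, last+1), collecting the C sites and then the G sites without ever enumerating non-matching positions in Python code.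
import Mathlib
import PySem

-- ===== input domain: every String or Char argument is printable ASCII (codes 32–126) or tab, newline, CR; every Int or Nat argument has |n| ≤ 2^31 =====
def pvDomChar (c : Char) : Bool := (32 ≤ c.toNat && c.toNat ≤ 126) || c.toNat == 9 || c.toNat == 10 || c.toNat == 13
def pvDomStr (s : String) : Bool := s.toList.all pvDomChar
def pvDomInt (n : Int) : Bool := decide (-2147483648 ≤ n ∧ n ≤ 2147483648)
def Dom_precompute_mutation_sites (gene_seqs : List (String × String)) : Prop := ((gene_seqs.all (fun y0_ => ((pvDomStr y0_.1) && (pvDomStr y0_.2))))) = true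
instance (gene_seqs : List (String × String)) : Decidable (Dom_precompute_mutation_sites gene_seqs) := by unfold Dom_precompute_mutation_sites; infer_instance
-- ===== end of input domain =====

-- B locates the C/G sites by repeated str.find jumps to the next occurrence instead of
-- A's two filtering enumerations of every base (alternative search strategy, same cost class).


-- ===== PORT A =====
-- literal port of A: two filtering comprehensions over enumerate(seq) per gene, inserted into site_cache
def precompute_mutation_sites (gene_seqs : List (String × String)) : List (String × List (String × List Int)) :=
  let site_cache : PySem.Dict String (List (String × List Int)) :=
    ((PySem.Dict.ofList gene_seqs).items).foldl
      (fun cache p =>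
        cache.insert p.1
          [("C", ((PySem.List.enumerate p.2.toList 0).filter (fun q => q.2 == 'C')).map (·.1)),
           ("G", ((PySem.List.enumerate p.2.toList 0).filter (fun q => q.2 == 'G')).map (·.1))])
      PySem.Dict.empty
  site_cache.items

-- ===== PORT B =====
-- port of Source B's 'while i != -1: positions.append(i); i = seq.find(base, i + 1)' loop:
-- the loop state (i, positions) recurses with PySem.Chars.findFrom (= Python str.find(sub, start));
-- the fuel bound len(seq)+1 only makes the recursion structural — it is never exhausted, since
-- each found index is strictly larger than the previous one
def pvFindLoop (cs : List Char) (b : Char) (fuel : Nat) (i : Int) (positions : List Int) : List Int :=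
  match fuel with
  | 0 => positions
  | fuel + 1 =>
      if i = -1 then positions
      else pvFindLoop cs b fuel (PySem.Chars.findFrom cs [b] (i + 1)) (positions ++ [i])

def precompute_mutation_sites_alt (gene_seqs : List (String × String)) : List (String × List (String × List Int)) :=
  let site_cache : PySem.Dict String (List (String × List Int)) :=
    ((PySem.Dict.ofList gene_seqs).items).foldl
      (fun cache p =>
        let cs := p.2.toList
        -- for base in 'CG': sites[base] = find-jump loop over seq
        let sites : PySem.Dict String (List Int) :=
          (['C', 'G'] : List Char).foldl
            (fun d b => d.insert (String.ofList [b]) (pvFindLoop cs b (cs.length + 1) (PySem.Chars.find cs [b]) []))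
            PySem.Dict.empty
        cache.insert p.1 sites.items)
      PySem.Dict.empty
  site_cache.items

-- ===== PRECONDITION & SPEC =====
def Spec_precompute_mutation_sites (gene_seqs : List (String × String)) (out : List (String × List (String × List Int))) : Prop := out = precompute_mutation_sites_alt gene_seqs
instance (gene_seqs : List (String × String)) (out : List (String × List (String × List Int))) : Decidable (Spec_precompute_mutation_sites gene_seqs out) := by unfold Spec_precompute_mutation_sites; infer_instance

-- ===== CLAIM (what is proved, stated in full; the proofs are below) =====
def Claim_equal_precompute_mutation_sites : Prop := ∀ (gene_seqs : List (String × String)), Dom_precompute_mutation_sites gene_seqs → Spec_precompute_mutation_sites gene_seqs (precompute_mutation_sites gene_seqs)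

-- ===== LEMMAS AND PROOFS =====

-- Chars.find.go with a single-char needle is first-index search from accumulator k
theorem pv_go_single (c : Char) (xs : List Char) (k : Nat) :
    PySem.Chars.find.go [c] xs k =
      (match List.findIdx? (fun x => x == c) xs with
       | none => -1
       | some j => ((k + j : Nat) : Int)) := by
  induction xs generalizing k with
  | nil => simp [PySem.Chars.find.go]
  | cons x t ih =>
      by_cases hx : x = c
      · subst hx; simp [PySem.Chars.find.go, List.findIdx?_cons]
      · have hx2 : ¬ c = x := fun h => hx h.symm
        simp only [PySem.Chars.find.go, List.findIdx?_cons, ih]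
        simp only [beq_iff_eq, hx, if_false, List.isPrefixOf, hx2, Bool.and_eq_true]
        cases h : List.findIdx? (fun x => x == c) t <;> simp [h] <;> ring

-- Python seq.find(base) for a single-char needle
theorem pv_find_single (cs : List Char) (c : Char) :
    PySem.Chars.find cs [c] =
      (match List.findIdx? (fun x => x == c) cs with
       | none => -1
       | some j => (j : Int)) := by
  rw [show PySem.Chars.find cs [c] = PySem.Chars.find.go [c] cs 0 from rfl, pv_go_single]
  cases h : List.findIdx? (fun x => x == c) cs <;> simp [h]

-- Python seq.find(base, st) for a single-char needle and a nonnegative start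
theorem pv_findFrom_single (cs : List Char) (c : Char) (st : Nat) :
    PySem.Chars.findFrom cs [c] (st : Int) =
      (match List.findIdx? (fun x => x == c) (cs.drop st) with
       | none => -1
       | some j => ((st + j : Nat) : Int)) := by
  simp only [PySem.Chars.findFrom]
  have h0 : ¬ ((st : Int) < 0) := by omega
  simp only [h0, if_false]
  by_cases hlt : cs.length < st
  · rw [if_pos (by exact_mod_cast hlt)]
    rw [List.drop_eq_nil_of_le (le_of_lt hlt)]
    simp
  · rw [if_neg (by push_cast; omega)]
    simp only [Int.toNat_natCast, List.take_length, pv_find_single]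
    cases h : List.findIdx? (fun x => x == c) (cs.drop st) with
    | none => simp
    | some j =>
        rw [if_neg (show ¬((j : Int) = -1) by omega)]
        push_cast; ring

-- proof-side description of the find-jump loop: the indices ≥ st at which b occurs, via findIdx?
def pvIdxs (cs : List Char) (b : Char) (st : Nat) : List Int :=
  match h : List.findIdx? (fun x => x == b) (cs.drop st) with
  | none => []
  | some j => ((st + j : Nat) : Int) :: pvIdxs cs b (st + j + 1)
termination_by cs.length - st
decreasing_by
  have hj : j < (cs.drop st).length := (List.findIdx?_eq_some_iff_findIdx_eq.mp h).1
  simp [List.length_drop] at hj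
  omega

theorem pvIdxs_none (cs : List Char) (b : Char) (st : Nat)
    (h : List.findIdx? (fun x => x == b) (cs.drop st) = none) : pvIdxs cs b st = [] := by
  rw [pvIdxs.eq_def]
  split <;> simp_all

theorem pvIdxs_some (cs : List Char) (b : Char) (st j : Nat)
    (h : List.findIdx? (fun x => x == b) (cs.drop st) = some j) :
    pvIdxs cs b st = ((st + j : Nat) : Int) :: pvIdxs cs b (st + j + 1) := by
  rw [pvIdxs.eq_def]
  split <;> simp_all

-- the find-jump loop, started at any index st, appends exactly the b-sites ≥ st
theorem pvFindLoop_eq (n : Nat) (cs : List Char) (b : Char) (st fuel : Nat)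
    (hn : cs.length + 1 - st ≤ n) (hf : cs.length + 1 - st ≤ fuel) (ps : List Int) :
    pvFindLoop cs b fuel (PySem.Chars.findFrom cs [b] (st : Int)) ps = ps ++ pvIdxs cs b st := by
  induction n generalizing st fuel ps with
  | zero =>
      have hdrop : cs.drop st = [] := List.drop_eq_nil_of_le (by omega)
      rw [pv_findFrom_single, pvIdxs_none cs b st (by rw [hdrop]; simp), hdrop]
      cases fuel <;> simp [pvFindLoop]
  | succ n ih =>
      rw [pv_findFrom_single]
      cases h : List.findIdx? (fun x => x == b) (cs.drop st) with
      | none =>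
          rw [pvIdxs_none cs b st h]
          cases fuel <;> simp [pvFindLoop]
      | some j =>
          have hj : j < (cs.drop st).length := (List.findIdx?_eq_some_iff_findIdx_eq.mp h).1
          have hjl : st + j < cs.length := by simp [List.length_drop] at hj; omega
          cases fuel with
          | zero => omega
          | succ f =>
              rw [pvFindLoop]
              rw [if_neg (show ¬(((st + j : Nat) : Int) = -1) by omega)]
              have hcast : ((st + j : Nat) : Int) + 1 = ((st + j + 1 : Nat) : Int) := by push_cast; ring
              rw [hcast, ih (st + j + 1) f (by omega) (by omega)]
              rw [pvIdxs_some cs b st j h]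
              simp

-- skipping a non-b character does not change the remaining sites
theorem pvIdxs_step (cs : List Char) (b : Char) (st : Nat) (hst : st < cs.length)
    (hxb : ¬ cs[st] = b) : pvIdxs cs b st = pvIdxs cs b (st + 1) := by
  have h2 : List.findIdx? (fun x => x == b) (cs.drop st)
      = Option.map (fun i => i + 1) (List.findIdx? (fun x => x == b) (cs.drop (st + 1))) := by
    rw [List.drop_eq_getElem_cons hst, List.findIdx?_cons]
    simp [hxb]
  cases h3 : List.findIdx? (fun x => x == b) (cs.drop (st + 1)) with
  | none => rw [pvIdxs_none cs b st (by rw [h2, h3]; rfl), pvIdxs_none cs b (st + 1) h3]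
  | some j =>
      rw [pvIdxs_some cs b st (j + 1) (by rw [h2, h3]; rfl), pvIdxs_some cs b (st + 1) j h3]
      simp [show st + (j + 1) = st + 1 + j from by omega]

-- pvIdxs is A's filtered enumeration of the remaining suffix
theorem pvIdxs_eq (n : Nat) (cs : List Char) (b : Char) (st : Nat) (hn : cs.length - st ≤ n) :
    pvIdxs cs b st =
      ((PySem.List.enumerate (cs.drop st) (st : Int)).filter (fun q => q.2 == b)).map (·.1) := by
  induction n generalizing st with
  | zero =>
      have hdrop : cs.drop st = [] := List.drop_eq_nil_of_le (by omega)
      rw [pvIdxs_none cs b st (by rw [hdrop]; simp), hdrop]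
      simp [PySem.List.enumerate]
  | succ n ih =>
      by_cases hlen : cs.length ≤ st
      · have hdrop : cs.drop st = [] := List.drop_eq_nil_of_le hlen
        rw [pvIdxs_none cs b st (by rw [hdrop]; simp), hdrop]
        simp [PySem.List.enumerate]
      · have hst : st < cs.length := by omega
        have hdrop : cs.drop st = cs[st] :: cs.drop (st + 1) := List.drop_eq_getElem_cons hst
        by_cases hxb : cs[st] = b
        · have hsome : List.findIdx? (fun x => x == b) (cs.drop st) = some 0 := by
            rw [hdrop, List.findIdx?_cons]; simp [hxb]
          rw [pvIdxs_some cs b st 0 hsome, hdrop, PySem.List.enumerate_cons]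
          rw [List.filter_cons_of_pos (by simp [hxb])]
          rw [List.map_cons, ih (st + 1) (by omega)]
          push_cast
          simp
        · rw [pvIdxs_step cs b st hst hxb, hdrop, PySem.List.enumerate_cons]
          rw [List.filter_cons_of_neg (by simp [hxb])]
          rw [ih (st + 1) (by omega)]
          push_cast
          simp

-- the whole per-base loop of B computes A's filtered enumeration
theorem pv_loop_result (cs : List Char) (b : Char) :
    pvFindLoop cs b (cs.length + 1) (PySem.Chars.find cs [b]) [] =
      ((PySem.List.enumerate cs 0).filter (fun q => q.2 == b)).map (·.1) := by
  have h0 : PySem.Chars.find cs [b] = PySem.Chars.findFrom cs [b] ((0 : Nat) : Int) := by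
    rw [pv_find_single, pv_findFrom_single]
    simp
  rw [h0, pvFindLoop_eq (cs.length + 1) cs b 0 (cs.length + 1) (by omega) (by omega)]
  rw [pvIdxs_eq cs.length cs b 0 (by omega)]
  simp

-- B's inner two-key dict has exactly the association list A builds
theorem pv_inner_items (v w : List Int) :
    ((((PySem.Dict.empty : PySem.Dict String (List Int))).insert (String.ofList ['C']) v).insert
        (String.ofList ['G']) w).items = [("C", v), ("G", w)] := by
  simp [PySem.Dict.insert, PySem.Dict.empty, PySem.Dict.contains, PySem.Dict.items]

-- ===== VERDICT (by name: the statement is the Claim_ definition above) =====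
theorem precompute_mutation_sites_spec : Claim_equal_precompute_mutation_sites := by
  intro gene_seqs _
  unfold Spec_precompute_mutation_sites
  unfold precompute_mutation_sites precompute_mutation_sites_alt
  simp only [List.foldl_cons, List.foldl_nil, pv_loop_result, pv_inner_items]
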